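-- pv_equiv track=rewrite | github.com/ADA-research/context-group-detection | datasets/preparer.py | get_scene_groups
-- ===== SOURCE A (Python) =====
-- def get_scene_groups(agents, groups):
--     """
--     Filter groups with agents that exist in frame combination.
--     :param agents: agents in frame combination
--     :param groups: groups to be filtered
--     :return: list of groups
--     """
--     comb_groups = []
--     for agent in agents:
--         for group in groups:
--             if agent in group and group not in comb_groups:
--                 comb_groups.append(group)
--     comb_groups_filtered = [[agent for agent in comb_group if agent in agents] for comb_group in comb_groups]
--     return comb_groups_filtered
-- ===== SOURCE B (Python) =====
-- def get_scene_groups(agents, groups):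
--     # Index agent -> groups containing it (one pass over groups), then walk
--     # agents once, deduping group values with a seen-set and filtering members
--     # against a set of agents.
--     idx = {}
--     for g in groups:
--         for a in dict.fromkeys(g):
--             idx.setdefault(a, []).append(g)
--     agent_set = set(agents)
--     seen = set()
--     out = []
--     for agent in agents:
--         for g in idx.get(agent, []):
--             t = tuple(g)
--             if t not in seen:
--                 seen.add(t)
--                 out.append([a for a in g if a in agent_set])
--     return out
-- ===== Notes on version B (the rewrite author's own statement) =====
-- stated objective: faster
-- what changed: Replaces A's agents x groups x members nested scans (with a linear 'group not in comb_groups' scan inside) by a one-pass agent-to-groups index dict, a seen-set for dedup and an agents-set for the final membership filter.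
import Mathlib
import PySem

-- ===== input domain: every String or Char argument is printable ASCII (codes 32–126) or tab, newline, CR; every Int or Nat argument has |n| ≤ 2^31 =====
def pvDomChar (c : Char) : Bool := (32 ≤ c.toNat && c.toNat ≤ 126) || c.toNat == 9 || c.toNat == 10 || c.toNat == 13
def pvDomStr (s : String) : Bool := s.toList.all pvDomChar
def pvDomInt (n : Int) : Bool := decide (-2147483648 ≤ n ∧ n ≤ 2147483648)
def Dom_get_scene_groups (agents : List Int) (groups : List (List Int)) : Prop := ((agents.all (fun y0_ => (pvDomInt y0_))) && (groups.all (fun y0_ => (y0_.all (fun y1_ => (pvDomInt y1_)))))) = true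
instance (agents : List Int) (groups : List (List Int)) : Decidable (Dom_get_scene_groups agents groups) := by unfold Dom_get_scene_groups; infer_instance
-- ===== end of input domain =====

-- B replaces A's agents×groups×members nested scans by a one-pass agent→groups
-- index plus a seen-set dedup and an agents-set membership filter (faster).

-- ===== PORT A =====
def get_scene_groups (agents : List Int) (groups : List (List Int)) : List (List Int) :=
  let comb := agents.foldl (fun acc agent =>
    groups.foldl (fun acc2 group =>
      if agent ∈ group ∧ group ∉ acc2 then acc2 ++ [group] else acc2) acc) []
  comb.map (fun g => g.filter (fun a => decide (a ∈ agents)))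

-- ===== PORT B =====
def get_scene_groups_alt (agents : List Int) (groups : List (List Int)) : List (List Int) :=
  let idx : PySem.Dict Int (List (List Int)) := groups.foldl (fun d g =>
      (PySem.List.dedup g).foldl (fun d a => d.modify a [] (· ++ [g])) d) PySem.Dict.empty
  let agentSet : PySem.Set Int := PySem.Set.ofList agents
  let res := agents.foldl (fun (st : PySem.Set (List Int) × List (List Int)) agent =>
      (idx.getD agent []).foldl (fun st g =>
        if g ∈ st.1 then st
        else (PySem.Set.add st.1 g, st.2 ++ [g.filter (fun a => decide (a ∈ agentSet))])) st)
    (PySem.Set.empty, [])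
  res.2

-- ===== PRECONDITION & SPEC =====
def Spec_get_scene_groups (agents : List Int) (groups : List (List Int)) (out : List (List Int)) : Prop := out = get_scene_groups_alt agents groups
instance (agents : List Int) (groups : List (List Int)) (out : List (List Int)) : Decidable (Spec_get_scene_groups agents groups out) := by unfold Spec_get_scene_groups; infer_instance

-- ===== CLAIM (what is proved, stated in full; the proofs are below) =====
def Claim_equal_get_scene_groups : Prop := ∀ (agents : List Int) (groups : List (List Int)), Dom_get_scene_groups agents groups → Spec_get_scene_groups agents groups (get_scene_groups agents groups)

-- ===== LEMMAS AND PROOFS =====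

-- filtering the (member, group) pairs of a Nodup member list down to member a
theorem map_pair_filter (a : Int) (g : List Int) (l : List Int) (h : l.Nodup) :
    ((l.map (fun x => (x, g))).filter (fun p => p.1 == a)).map (·.2)
    = if a ∈ l then [g] else [] := by
  induction l with
  | nil => simp
  | cons x xs ih =>
    rcases List.nodup_cons.mp h with ⟨hx, hxs⟩
    by_cases hxa : x = a
    · subst hxa
      have hnil : (xs.map (fun y => (y, g))).filter (fun p => p.1 == x) = [] := by
        apply List.filter_eq_nil_iff.mpr
        rintro ⟨y, gy⟩ hp
        rcases List.mem_map.mp hp with ⟨y', hy', he⟩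
        cases he
        intro hyx
        exact absurd ((beq_iff_eq.mp hyx) ▸ hy') hx
      simp [hnil]
    · simp only [List.map_cons, List.filter_cons]
      rw [if_neg (by simp [hxa]), ih hxs]
      by_cases hax : a ∈ xs <;> simp [hax, Ne.symm hxa]

-- the index bucket for a is exactly the groups containing a, in order
theorem idx_getD (groups : List (List Int)) (a : Int) :
    (groups.foldl (fun d g =>
        (PySem.List.dedup g).foldl (fun d x => d.modify x [] (· ++ [g])) d)
      (PySem.Dict.empty : PySem.Dict Int (List (List Int)))).getD a []
    = groups.filter (fun g => decide (a ∈ g)) := by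
  induction groups using List.reverseRecOn with
  | nil => simp [PySem.Dict.getD_empty]
  | append_singleton gs g ih =>
    rw [List.foldl_append, List.foldl_cons, List.foldl_nil]
    have hmap : ∀ (d : PySem.Dict Int (List (List Int))),
        (PySem.List.dedup g).foldl (fun d x => d.modify x [] (· ++ [g])) d
        = ((PySem.List.dedup g).map (fun x => (x, g))).foldl
            (fun d p => d.modify p.1 [] (· ++ [p.2])) d := by
      intro d; rw [List.foldl_map]
    rw [hmap, PySem.Dict.getD_foldl_modify_append, ih, List.filter_append]
    have : (((PySem.List.dedup g).map (fun x => (x, g))).filter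
        (fun p => p.1 == a)).map (·.2) = if a ∈ g then [g] else [] := by
      rw [map_pair_filter a g (PySem.List.dedup g) (PySem.List.nodup_dedup g)]
      by_cases hag : a ∈ g <;> simp [hag]
    rw [this]
    by_cases hag : a ∈ g <;> simp [hag]

-- A's inner scan over all groups equals the same scan over the groups containing the agent
theorem pass_filter (agent : Int) (gs : List (List Int)) (acc : List (List Int)) :
    gs.foldl (fun acc2 group =>
        if agent ∈ group ∧ group ∉ acc2 then acc2 ++ [group] else acc2) acc
    = (gs.filter (fun g => decide (agent ∈ g))).foldl (fun acc2 group =>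
        if agent ∈ group ∧ group ∉ acc2 then acc2 ++ [group] else acc2) acc := by
  induction gs generalizing acc with
  | nil => rfl
  | cons g gs ih =>
    by_cases hg : agent ∈ g
    · simp only [List.foldl_cons, List.filter_cons, hg, decide_true, if_true]
      exact ih _
    · simp only [List.foldl_cons, List.filter_cons, hg, decide_false, Bool.false_eq_true,
        if_false]
      rw [if_neg (by simp), ih]

-- inner loop invariant: over a common list of groups all containing the agent,
-- A's append-if-unseen list and B's (seen set, filtered output) stay aligned
theorem inner_inv (agent : Int) (fA : List Int → List Int)
    (gs : List (List Int)) (hgs : ∀ g ∈ gs, agent ∈ g)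
    (acc : List (List Int)) (seen : PySem.Set (List Int)) (out : List (List Int))
    (hmem : ∀ g, g ∈ seen ↔ g ∈ acc) (hout : out = acc.map fA) :
    (∀ g, g ∈ (gs.foldl (fun st g =>
        if g ∈ st.1 then st else (PySem.Set.add st.1 g, st.2 ++ [fA g])) (seen, out)).1
        ↔ g ∈ gs.foldl (fun acc2 group =>
            if agent ∈ group ∧ group ∉ acc2 then acc2 ++ [group] else acc2) acc) ∧
    (gs.foldl (fun st g =>
        if g ∈ st.1 then st else (PySem.Set.add st.1 g, st.2 ++ [fA g])) (seen, out)).2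
      = (gs.foldl (fun acc2 group =>
            if agent ∈ group ∧ group ∉ acc2 then acc2 ++ [group] else acc2) acc).map fA := by
  induction gs generalizing acc seen out with
  | nil => exact ⟨hmem, hout⟩
  | cons g gs ih =>
    have hag : agent ∈ g := hgs g (by simp)
    have hrest : ∀ g' ∈ gs, agent ∈ g' := fun g' h => hgs g' (by simp [h])
    simp only [List.foldl_cons]
    by_cases hs : g ∈ seen
    · have hacc : g ∈ acc := (hmem g).mp hs
      rw [if_pos hs, if_neg (by simp [hacc])]
      exact ih hrest acc seen out hmem hout
    · have hacc : g ∉ acc := fun h => hs ((hmem g).mpr h)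
      rw [if_neg hs, if_pos ⟨hag, hacc⟩]
      refine ih hrest (acc ++ [g]) (PySem.Set.add seen g) (out ++ [fA g]) ?_ ?_
      · intro g'; rw [PySem.Set.mem_add]; simp [hmem g']
      · simp [hout]

-- outer loop invariant over the agents
theorem outer_inv (groups : List (List Int)) (fA : List Int → List Int)
    (ags : List Int) (acc : List (List Int)) (seen : PySem.Set (List Int)) (out : List (List Int))
    (hmem : ∀ g, g ∈ seen ↔ g ∈ acc) (hout : out = acc.map fA) :
    (ags.foldl (fun (st : PySem.Set (List Int) × List (List Int)) agent =>
        ((groups.foldl (fun d g =>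
            (PySem.List.dedup g).foldl (fun d x => d.modify x [] (· ++ [g])) d)
          PySem.Dict.empty).getD agent []).foldl (fun st g =>
          if g ∈ st.1 then st else (PySem.Set.add st.1 g, st.2 ++ [fA g])) st) (seen, out)).2
    = (ags.foldl (fun acc agent =>
        groups.foldl (fun acc2 group =>
          if agent ∈ group ∧ group ∉ acc2 then acc2 ++ [group] else acc2) acc) acc).map fA := by
  induction ags generalizing acc seen out with
  | nil => exact hout
  | cons agent ags ih =>
    simp only [List.foldl_cons]
    rw [idx_getD groups agent, pass_filter agent groups acc]
    have hgs : ∀ g ∈ groups.filter (fun g => decide (agent ∈ g)), agent ∈ g := by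
      intro g hg; simpa using (List.mem_filter.mp hg).2
    obtain ⟨h1, h2⟩ := inner_inv agent fA _ hgs acc seen out hmem hout
    exact ih _ _ _ h1 h2

-- the two member filters agree (set(agents) membership = list membership)
theorem filter_agentSet (agents : List Int) (g : List Int) :
    g.filter (fun a => decide (a ∈ PySem.Set.ofList agents))
    = g.filter (fun a => decide (a ∈ agents)) := by
  apply List.filter_congr
  intro a _
  simp [PySem.Set.mem_ofList]

-- ===== VERDICT (by name: the statement is the Claim_ definition above) =====
theorem get_scene_groups_spec : Claim_equal_get_scene_groups := by
  intro agents groups _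
  unfold Spec_get_scene_groups get_scene_groups get_scene_groups_alt
  have hf : (fun st (g : List Int) =>
      if g ∈ (st : PySem.Set (List Int) × List (List Int)).1 then st
      else (PySem.Set.add st.1 g, st.2 ++ [g.filter (fun a => decide (a ∈ PySem.Set.ofList agents))]))
      = (fun st g =>
      if g ∈ (st : PySem.Set (List Int) × List (List Int)).1 then st
      else (PySem.Set.add st.1 g, st.2 ++ [g.filter (fun a => decide (a ∈ agents))])) := by
    funext st g; rw [filter_agentSet]
  simp only [hf]
  exact (outer_inv groups (fun g => g.filter (fun a => decide (a ∈ agents)))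
    agents [] PySem.Set.empty [] (by simp [PySem.Set.empty]) rfl).symm
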